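-- pv_equiv track=rewrite | github.com/LukaSukhitashvili/Group-41 | Level 072/homework/sum_of_n.py | sum_of_n
-- ===== SOURCE A (Python) =====
-- def sum_of_n(n):
--     result = []
--     total = 0
--     for i in range(abs(n) + 1):
--         total += i
--         if n < 0:
--             result.append(-total)
--         else:
--             result.append(total)
--     return result
-- ===== SOURCE B (Python) =====
-- def sum_of_n(n):
--     sign = -1 if n < 0 else 1
--     return [sign * (i * (i + 1) // 2) for i in range(abs(n) + 1)]
-- ===== Notes on version B (the rewrite author's own statement) =====
-- stated objective: simpler
-- what changed: Replaces the running-total accumulator loop with a single comprehension computing each signed triangular number in closed form i*(i+1)//2 times a precomputed sign.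
import Mathlib
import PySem

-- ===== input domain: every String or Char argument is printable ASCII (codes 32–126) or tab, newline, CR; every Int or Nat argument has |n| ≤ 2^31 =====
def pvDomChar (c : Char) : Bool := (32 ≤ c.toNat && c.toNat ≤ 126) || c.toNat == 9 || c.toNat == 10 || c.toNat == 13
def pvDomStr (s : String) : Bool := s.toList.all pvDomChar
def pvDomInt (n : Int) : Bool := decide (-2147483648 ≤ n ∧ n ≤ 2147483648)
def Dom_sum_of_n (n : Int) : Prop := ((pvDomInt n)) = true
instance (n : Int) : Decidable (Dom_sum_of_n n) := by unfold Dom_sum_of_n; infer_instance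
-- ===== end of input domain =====

-- B replaces A's running-total loop with a comprehension of closed-form signed triangular numbers (simpler decomposition, same cost).

-- ===== PORT A =====
def sum_of_n (n : Int) : List Int :=
  ((PySem.List.pyRange 0 (|n| + 1) 1).foldl
    (fun (st : List Int × Int) i =>
      let total := st.2 + i
      (st.1 ++ [if n < 0 then -total else total], total))
    ([], 0)).1

-- ===== PORT B =====
def sum_of_n_alt (n : Int) : List Int :=
  let sign : Int := if n < 0 then -1 else 1
  (PySem.List.pyRange 0 (|n| + 1) 1).map
    (fun i => sign * PySem.Int.floordiv (i * (i + 1)) 2)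

-- ===== PRECONDITION & SPEC =====
def Spec_sum_of_n (n : Int) (out : List Int) : Prop := out = sum_of_n_alt n
instance (n : Int) (out : List Int) : Decidable (Spec_sum_of_n n out) := by unfold Spec_sum_of_n; infer_instance

-- ===== CLAIM (what is proved, stated in full; the proofs are below) =====
def Claim_equal_sum_of_n : Prop := ∀ (n : Int), Dom_sum_of_n n → Spec_sum_of_n n (sum_of_n n)

-- ===== LEMMAS AND PROOFS =====

/-- Triangular numbers, 0 + 1 + … + (m-1), as the loop's total. -/
def pvTri : Nat → Int
  | 0 => 0
  | m + 1 => pvTri m + m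

theorem pvTri_nonneg (m : Nat) : 0 ≤ pvTri m := by
  induction m with
  | zero => simp [pvTri]
  | succ j ih => simp only [pvTri]; omega

theorem pvTri_natDiv (m : Nat) : m * (m + 1) / 2 = (pvTri (m + 1)).toNat := by
  induction m with
  | zero => simp [pvTri]
  | succ k ih =>
    have h : (k + 1) * (k + 2) = k * (k + 1) + (k + 1) * 2 := by ring
    have h2 : (k + 1) * (k + 1 + 1) / 2 = k * (k + 1) / 2 + (k + 1) := by
      rw [show k + 1 + 1 = k + 2 from rfl, h, Nat.add_mul_div_right _ _ (by norm_num)]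
    have hnn : 0 ≤ pvTri (k + 1) := pvTri_nonneg _
    simp only [pvTri] at *
    omega

theorem pvTri_closed (m : Nat) :
    PySem.Int.floordiv ((m : Int) * ((m : Int) + 1)) 2 = pvTri (m + 1) := by
  have hc : (m : Int) * ((m : Int) + 1) = ((m * (m + 1) : Nat) : Int) := by push_cast; ring
  rw [hc]
  have hfd : PySem.Int.floordiv ((m * (m + 1) : Nat) : Int) ((2 : Nat) : Int)
      = ((m * (m + 1) / 2 : Nat) : Int) := PySem.Int.floordiv_natCast _ _
  have hnn : 0 ≤ pvTri (m + 1) := pvTri_nonneg _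
  rw [show ((2 : Nat) : Int) = 2 from rfl] at hfd
  rw [hfd, pvTri_natDiv m]
  omega

theorem pvLoop_eq (n : Int) (m : Nat) :
    ((PySem.List.pyRange 0 (m : Int) 1).foldl
      (fun (st : List Int × Int) i =>
        (st.1 ++ [if n < 0 then -(st.2 + i) else st.2 + i], st.2 + i))
      ([], 0))
    = ((PySem.List.pyRange 0 (m : Int) 1).map
        (fun i => (if n < 0 then (-1 : Int) else 1) * PySem.Int.floordiv (i * (i + 1)) 2),
       pvTri m) := by
  induction m with
  | zero => simp [PySem.List.pyRange_one_eq_nil (by norm_num : (0:Int) ≤ 0), pvTri]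
  | succ k ih =>
    have hsplit : PySem.List.pyRange 0 ((k : Int) + 1) 1
        = PySem.List.pyRange 0 (k : Int) 1 ++ [(k : Int)] :=
      PySem.List.pyRange_one_succ_right (by positivity)
    have hcast : ((k + 1 : Nat) : Int) = (k : Int) + 1 := by push_cast; ring
    rw [hcast, hsplit, List.foldl_append, List.map_append, ih]
    simp only [List.foldl_cons, List.foldl_nil, List.map_cons, List.map_nil]
    rw [pvTri_closed k]
    have hval : (if n < 0 then -(pvTri k + (k : Int)) else pvTri k + (k : Int))
        = (if n < 0 then (-1 : Int) else 1) * pvTri (k + 1) := by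
      simp only [pvTri]; split_ifs <;> ring
    rw [hval, show pvTri k + (k : Int) = pvTri (k + 1) from by simp [pvTri]]

theorem sum_of_n_eq_alt (n : Int) : sum_of_n n = sum_of_n_alt n := by
  unfold sum_of_n sum_of_n_alt
  have habs : |n| + 1 = ((|n|.toNat + 1 : Nat) : Int) := by
    have := abs_nonneg n
    push_cast
    omega
  rw [habs]
  have := pvLoop_eq n (|n|.toNat + 1)
  simp only at this
  rw [this]

-- ===== VERDICT (by name: the statement is the Claim_ definition above) =====
theorem sum_of_n_spec : Claim_equal_sum_of_n := by
  intro n _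
  unfold Spec_sum_of_n
  exact sum_of_n_eq_alt n
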